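-- pv_equiv track=rewrite | github.com/namekridchai/FRIENDPLAYGROUND | script.py | evaluate_cards
-- ===== SOURCE A (Python) =====
-- def evaluate_cards(card_ids):
--     isLong  = False
--     isBig = False
--
--     for i in range(0,52,13):
--         suite = list(filter(lambda x : i<=x<=i+12,card_ids))
--         if len(suite)>=6:
--             isLong  = True
--
--         suite = list(filter(lambda x : i+9<=x<=i+12,card_ids))
--         if len(suite)>=3:
--             isBig = True
--
--     return isLong,isBig
-- ===== SOURCE B (Python) =====
-- def evaluate_cards(card_ids):
--     long_count = [0, 0, 0, 0]
--     big_count = [0, 0, 0, 0]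
--     for c in card_ids:
--         suit = c // 13
--         if 0 <= suit <= 3:
--             long_count[suit] += 1
--             if c - 13 * suit >= 9:
--                 big_count[suit] += 1
--     return (any(n >= 6 for n in long_count), any(n >= 3 for n in big_count))
-- ===== Notes on version B (the rewrite author's own statement) =====
-- stated objective: faster
-- what changed: Replaces the 8 per-suit filter scans over the hand with a single pass that bins each card by suit = c // 13 into two 4-entry count tables, then checks the thresholds.
import Mathlib
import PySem

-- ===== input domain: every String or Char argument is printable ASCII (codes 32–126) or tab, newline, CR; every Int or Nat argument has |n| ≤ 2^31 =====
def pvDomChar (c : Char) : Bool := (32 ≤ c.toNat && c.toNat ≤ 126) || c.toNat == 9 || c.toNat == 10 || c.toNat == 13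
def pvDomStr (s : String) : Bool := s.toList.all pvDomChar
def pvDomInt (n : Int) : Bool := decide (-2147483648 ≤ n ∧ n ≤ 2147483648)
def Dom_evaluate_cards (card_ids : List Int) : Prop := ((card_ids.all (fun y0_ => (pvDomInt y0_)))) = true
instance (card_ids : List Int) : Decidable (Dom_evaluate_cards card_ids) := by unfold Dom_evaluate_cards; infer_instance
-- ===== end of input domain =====

-- B replaces A's eight per-suit filter scans with one pass that bins each card by suit = c // 13
-- into two 4-entry count tables; the equality of return values is proved below.

-- ===== PORT A =====
def evaluate_cards (card_ids : List Int) : Bool × Bool :=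
  (PySem.List.pyRange 0 52 13).foldl
    (fun (st : Bool × Bool) (i : Int) =>
      let suite1 := card_ids.filter (fun x => decide (i ≤ x ∧ x ≤ i + 12))
      let isLong := if suite1.length ≥ 6 then true else st.1
      let suite2 := card_ids.filter (fun x => decide (i + 9 ≤ x ∧ x ≤ i + 12))
      let isBig := if suite2.length ≥ 3 then true else st.2
      (isLong, isBig))
    (false, false)

-- ===== PORT B =====
-- one step of B's loop: list[suit] += 1 is List.set at index suit
def evalStep (st : List Int × List Int) (c : Int) : List Int × List Int :=
  let suit := PySem.Int.floordiv c 13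
  if _h : 0 ≤ suit ∧ suit ≤ 3 then
    let s := suit.toNat
    let lc := st.1.set s (st.1.getD s 0 + 1)
    let bc := if c - 13 * suit ≥ 9 then st.2.set s (st.2.getD s 0 + 1) else st.2
    (lc, bc)
  else st

def evaluate_cards_alt (card_ids : List Int) : Bool × Bool :=
  let st := card_ids.foldl evalStep ([0, 0, 0, 0], [0, 0, 0, 0])
  (st.1.any (fun n => n ≥ 6), st.2.any (fun n => n ≥ 3))

-- ===== PRECONDITION & SPEC =====
def Spec_evaluate_cards (card_ids : List Int) (out : Bool × Bool) : Prop := out = evaluate_cards_alt card_ids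
instance (card_ids : List Int) (out : Bool × Bool) : Decidable (Spec_evaluate_cards card_ids out) := by unfold Spec_evaluate_cards; infer_instance

-- ===== CLAIM (what is proved, stated in full; the proofs are below) =====
def Claim_equal_evaluate_cards : Prop := ∀ (card_ids : List Int), Dom_evaluate_cards card_ids → Spec_evaluate_cards card_ids (evaluate_cards card_ids)

-- ===== LEMMAS AND PROOFS =====

-- the count of cards of suit j, and of big cards of suit j, in the hand
def cntL (xs : List Int) (j : Nat) : Nat := xs.countP (fun c => decide ((13 * j : Int) ≤ c ∧ c ≤ 13 * j + 12))
def cntB (xs : List Int) (j : Nat) : Nat := xs.countP (fun c => decide ((13 * j + 9 : Int) ≤ c ∧ c ≤ 13 * j + 12))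

lemma cntL_cons (c : Int) (xs : List Int) (j : Nat) :
    cntL (c :: xs) j = cntL xs j + (if (13 * (j : Int)) ≤ c ∧ c ≤ 13 * (j : Int) + 12 then 1 else 0) := by
  simp [cntL, List.countP_cons]

lemma cntB_cons (c : Int) (xs : List Int) (j : Nat) :
    cntB (c :: xs) j = cntB xs j + (if (13 * (j : Int) + 9) ≤ c ∧ c ≤ 13 * (j : Int) + 12 then 1 else 0) := by
  simp [cntB, List.countP_cons]

lemma getD_set (l : List Int) (s j : Nat) (v : Int) (hs : s < l.length) :
    (l.set s v).getD j 0 = if s = j then v else l.getD j 0 := by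
  by_cases h : s = j
  · subst h; simp [List.getD_eq_getElem?_getD, hs]
  · simp [List.getD_eq_getElem?_getD, List.getElem?_set_ne h, h]

-- invariant of B's fold, entrywise
lemma foldB_spec (xs : List Int) (l b : List Int) (hl : l.length = 4) (hb : b.length = 4) :
    (xs.foldl evalStep (l, b)).1.length = 4 ∧ (xs.foldl evalStep (l, b)).2.length = 4 ∧
    ∀ j : Nat, j < 4 →
      (xs.foldl evalStep (l, b)).1.getD j 0 = l.getD j 0 + (cntL xs j : Int) ∧
      (xs.foldl evalStep (l, b)).2.getD j 0 = b.getD j 0 + (cntB xs j : Int) := by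
  induction xs generalizing l b with
  | nil => simp [cntL, cntB, hl, hb]
  | cons c xs ih =>
    have hdiv : PySem.Int.floordiv c 13 = c / 13 :=
      PySem.Int.floordiv_eq_ediv_of_pos (by norm_num)
    simp only [List.foldl_cons]
    by_cases hg : 0 ≤ PySem.Int.floordiv c 13 ∧ PySem.Int.floordiv c 13 ≤ 3
    · -- card lands in a valid suit s = (c / 13).toNat
      rw [hdiv] at hg
      have hsn : (c / 13).toNat < 4 := by omega
      have heq : ((c / 13).toNat : Int) = c / 13 := by omega
      have hstep : evalStep (l, b) c =
          (l.set (c / 13).toNat (l.getD (c / 13).toNat 0 + 1),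
           if c - 13 * (c / 13) ≥ 9 then b.set (c / 13).toNat (b.getD (c / 13).toNat 0 + 1) else b) := by
        unfold evalStep
        rw [hdiv, dif_pos hg]
      rw [hstep]
      have hl' : (l.set (c / 13).toNat (l.getD (c / 13).toNat 0 + 1)).length = 4 := by
        simp [hl]
      have hb' : (if c - 13 * (c / 13) ≥ 9 then b.set (c / 13).toNat (b.getD (c / 13).toNat 0 + 1) else b).length = 4 := by
        split <;> simp [hb]
      obtain ⟨h1, h2, h3⟩ := ih _ _ hl' hb'
      refine ⟨h1, h2, fun j hj => ?_⟩
      obtain ⟨e1, e2⟩ := h3 j hj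
      have hiffL : ((13 * (j : Int)) ≤ c ∧ c ≤ 13 * (j : Int) + 12) ↔ ((c / 13).toNat = j) := by omega
      have hiffB : ((13 * (j : Int) + 9) ≤ c ∧ c ≤ 13 * (j : Int) + 12) ↔
          ((c / 13).toNat = j ∧ c - 13 * (c / 13) ≥ 9) := by omega
      constructor
      · rw [e1, getD_set l _ j _ (by omega), cntL_cons]
        by_cases hsj : (c / 13).toNat = j
        · rw [if_pos hsj, if_pos (hiffL.mpr hsj), hsj]
          push_cast; ring
        · rw [if_neg hsj, if_neg (by simpa [hiffL] using hsj)]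
          simp
      · rw [e2, cntB_cons]
        by_cases hbig : c - 13 * (c / 13) ≥ 9
        · rw [if_pos hbig, getD_set b _ j _ (by omega)]
          by_cases hsj : (c / 13).toNat = j
          · rw [if_pos hsj, if_pos (hiffB.mpr ⟨hsj, hbig⟩), hsj]
            push_cast; ring
          · rw [if_neg hsj, if_neg (by simp only [hiffB]; tauto)]
            simp
        · rw [if_neg hbig, if_neg (by simp only [hiffB]; tauto)]
          simp
    · -- card outside the deck: no counter changes, and it matches no suit range
      rw [hdiv] at hg
      have hstep : evalStep (l, b) c = (l, b) := by
        unfold evalStep; rw [hdiv, dif_neg hg]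
      rw [hstep]
      obtain ⟨h1, h2, h3⟩ := ih _ _ hl hb
      refine ⟨h1, h2, fun j hj => ?_⟩
      obtain ⟨e1, e2⟩ := h3 j hj
      have hnL : ¬ ((13 * (j : Int)) ≤ c ∧ c ≤ 13 * (j : Int) + 12) := by omega
      have hnB : ¬ ((13 * (j : Int) + 9) ≤ c ∧ c ≤ 13 * (j : Int) + 12) := by omega
      refine ⟨?_, ?_⟩
      · rw [e1, cntL_cons, if_neg hnL]; push_cast; ring
      · rw [e2, cntB_cons, if_neg hnB]; push_cast; ring

lemma list_eq_four (L : List Int) (h : L.length = 4) :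
    L = [L.getD 0 0, L.getD 1 0, L.getD 2 0, L.getD 3 0] := by
  match L, h with
  | [a, b, c, d], _ => rfl

-- ===== VERDICT (by name: the statement is the Claim_ definition above) =====
theorem evaluate_cards_spec : Claim_equal_evaluate_cards := by
  intro xs _
  unfold Spec_evaluate_cards
  obtain ⟨h1, h2, h3⟩ := foldB_spec xs [0, 0, 0, 0] [0, 0, 0, 0] rfl rfl
  have hL : (xs.foldl evalStep ([0, 0, 0, 0], [0, 0, 0, 0])).1 =
      [(cntL xs 0 : Int), cntL xs 1, cntL xs 2, cntL xs 3] := by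
    rw [list_eq_four _ h1]
    rw [(h3 0 (by omega)).1, (h3 1 (by omega)).1, (h3 2 (by omega)).1, (h3 3 (by omega)).1]
    norm_num [List.getD]
  have hB : (xs.foldl evalStep ([0, 0, 0, 0], [0, 0, 0, 0])).2 =
      [(cntB xs 0 : Int), cntB xs 1, cntB xs 2, cntB xs 3] := by
    rw [list_eq_four _ h2]
    rw [(h3 0 (by omega)).2, (h3 1 (by omega)).2, (h3 2 (by omega)).2, (h3 3 (by omega)).2]
    norm_num [List.getD]
  have hrange : PySem.List.pyRange 0 52 13 = [0, 13, 26, 39] := by decide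
  have halt : evaluate_cards_alt xs =
      (((cntL xs 0 : Int) ≥ 6 || (cntL xs 1 : Int) ≥ 6 || (cntL xs 2 : Int) ≥ 6 || (cntL xs 3 : Int) ≥ 6),
       ((cntB xs 0 : Int) ≥ 3 || (cntB xs 1 : Int) ≥ 3 || (cntB xs 2 : Int) ≥ 3 || (cntB xs 3 : Int) ≥ 3)) := by
    simp only [evaluate_cards_alt, hL, hB, List.any_cons, List.any_nil]
    simp [Bool.or_assoc]
  have hcnt : ∀ (j : Nat), (xs.filter (fun x => decide ((13 * j : Int) ≤ x ∧ x ≤ 13 * j + 12))).length = cntL xs j ∧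
      (xs.filter (fun x => decide ((13 * j + 9 : Int) ≤ x ∧ x ≤ 13 * j + 12))).length = cntB xs j := by
    intro j
    constructor <;> simp [cntL, cntB, List.countP_eq_length_filter]
  rw [halt]
  simp only [evaluate_cards, hrange, List.foldl_cons, List.foldl_nil]
  have q0 := (hcnt 0).1; have q1 := (hcnt 1).1; have q2 := (hcnt 2).1; have q3 := (hcnt 3).1
  have r0 := (hcnt 0).2; have r1 := (hcnt 1).2; have r2 := (hcnt 2).2; have r3 := (hcnt 3).2
  norm_num at q0 q1 q2 q3 r0 r1 r2 r3 ⊢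
  rw [q0, q1, q2, q3, r0, r1, r2, r3]
  constructor <;>
  · apply Bool.eq_iff_iff.mpr
    simp only [Bool.or_eq_true]
    tauto
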